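-- pv_equiv track=rewrite | github.com/Voyagetechsolutions/PDRI | dmitry/tools/strategic_advisor.py | _estimate_remediation
-- ===== SOURCE A (Python) =====
-- from typing import Any, Dict, List, Optional
--
-- def _estimate_remediation(findings: List[Dict]) -> float:
--     """Estimate remediation cost."""
--     cost = 0
--     for f in findings:
--         if f["severity"] == "high":
--             cost += 500000
--         elif f["severity"] == "medium":
--             cost += 150000
--         else:
--             cost += 50000
--     return cost
-- ===== SOURCE B (Python) =====
-- def _estimate_remediation(findings):
--     """Estimate remediation cost: tally severities once, then closed-form arithmetic."""
--     tally = {}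
--     for f in findings:
--         s = f["severity"]
--         tally[s] = tally.get(s, 0) + 1
--     h = tally.get("high", 0)
--     m = tally.get("medium", 0)
--     return 500000 * h + 150000 * m + 50000 * (len(findings) - h - m)
-- ===== Notes on version B (the rewrite author's own statement) =====
-- stated objective: alternative
-- what changed: Replaces per-item cost accumulation with a single tally of severity labels into a dict followed by one closed-form arithmetic expression (the 'other' bucket computed as len - high - medium).
import Mathlib
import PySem

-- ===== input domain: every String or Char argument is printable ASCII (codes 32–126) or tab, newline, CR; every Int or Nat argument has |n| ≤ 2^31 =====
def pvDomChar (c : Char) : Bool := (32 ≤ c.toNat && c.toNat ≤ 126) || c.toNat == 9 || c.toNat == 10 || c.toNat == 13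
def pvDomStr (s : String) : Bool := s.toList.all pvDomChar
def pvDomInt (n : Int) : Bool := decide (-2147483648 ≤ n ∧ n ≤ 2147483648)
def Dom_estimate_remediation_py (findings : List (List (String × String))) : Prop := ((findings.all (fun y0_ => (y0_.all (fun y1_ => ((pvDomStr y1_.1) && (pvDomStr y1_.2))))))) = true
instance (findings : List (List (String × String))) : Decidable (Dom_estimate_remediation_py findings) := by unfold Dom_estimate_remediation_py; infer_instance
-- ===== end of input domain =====

-- B replaces A's per-item cost accumulation by a one-pass severity tally plus one
-- closed-form arithmetic expression (objective: alternative decomposition, same cost).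

-- ===== PORT A =====
-- f["severity"] = first-match lookup; `none` = KeyError, excluded by Pre_ (the 0-branch is unreachable there)
def estimate_remediation_py (findings : List (List (String × String))) : Int :=
  findings.foldl (fun cost f =>
    match (PySem.Dict.mk f).get? "severity" with
    | some s =>
        if s == "high" then cost + 500000
        else if s == "medium" then cost + 150000
        else cost + 50000
    | none => cost) 0

-- ===== PORT B =====
-- `none` = KeyError in B too, excluded by Pre_ (the skip branch is unreachable there)
def estimate_remediation_py_alt (findings : List (List (String × String))) : Int :=
  let tally : PySem.Dict String Int := findings.foldl (fun d f =>
    match (PySem.Dict.mk f).get? "severity" with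
    | some s => d.modify s 0 (· + 1)
    | none => d) PySem.Dict.empty
  let h := tally.getD "high" 0
  let m := tally.getD "medium" 0
  500000 * h + 150000 * m + 50000 * ((findings.length : Int) - h - m)

-- ===== PRECONDITION & SPEC =====
-- Pre_ excludes exactly the findings lacking a "severity" key, where Python A (and B) raise KeyError.
def Pre_estimate_remediation_py (findings : List (List (String × String))) : Prop :=
  (findings.all (fun f => (PySem.Dict.mk f).contains "severity")) = true
instance (findings : List (List (String × String))) : Decidable (Pre_estimate_remediation_py findings) := by unfold Pre_estimate_remediation_py; infer_instance

def pvWitness_estimate_remediation_py : (List (List (String × String))) :=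
  [[("severity", "high")], [("severity", "low"), ("id", "x")]]

def Spec_estimate_remediation_py (findings : List (List (String × String))) (out : Int) : Prop := out = estimate_remediation_py_alt findings
instance (findings : List (List (String × String))) (out : Int) : Decidable (Spec_estimate_remediation_py findings out) := by unfold Spec_estimate_remediation_py; infer_instance

-- ===== CLAIM (what is proved, stated in full; the proofs are below) =====
def Claim_equal_estimate_remediation_py : Prop := ∀ (findings : List (List (String × String))), Dom_estimate_remediation_py findings → Pre_estimate_remediation_py findings → Spec_estimate_remediation_py findings (estimate_remediation_py findings)

-- ===== LEMMAS AND PROOFS =====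

-- the list of severity labels actually found
def pvSevs (findings : List (List (String × String))) : List String :=
  findings.filterMap (fun f => (PySem.Dict.mk f).get? "severity")

lemma pvFoldA (findings : List (List (String × String))) (c : Int) :
    findings.foldl (fun cost f =>
      match (PySem.Dict.mk f).get? "severity" with
      | some s =>
          if s == "high" then cost + 500000
          else if s == "medium" then cost + 150000
          else cost + 50000
      | none => cost) c
    = c + 500000 * ((pvSevs findings).count "high")
        + 150000 * ((pvSevs findings).count "medium")
        + 50000 * (((pvSevs findings).length : Int)
            - ((pvSevs findings).count "high") - ((pvSevs findings).count "medium")) := by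
  induction findings generalizing c with
  | nil => simp [pvSevs]
  | cons f rest ih =>
    simp only [List.foldl_cons]
    rw [ih]
    cases hs : (PySem.Dict.mk f).get? "severity" with
    | none => simp [pvSevs, hs]
    | some s =>
      by_cases h1 : s = "high"
      · subst h1
        simp [pvSevs, hs]
        ring
      · by_cases h2 : s = "medium"
        · subst h2
          simp [pvSevs, hs]
          ring
        · simp [pvSevs, hs, h1, h2]
          ring

lemma pvFoldB (findings : List (List (String × String))) (d : PySem.Dict String Int) :
    findings.foldl (fun d f =>
      match (PySem.Dict.mk f).get? "severity" with
      | some s => d.modify s 0 (· + 1)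
      | none => d) d
    = (pvSevs findings).foldl (fun d x => d.modify x 0 (· + 1)) d := by
  induction findings generalizing d with
  | nil => simp [pvSevs]
  | cons f rest ih =>
    simp only [List.foldl_cons, pvSevs, List.filterMap_cons]
    cases hs : (PySem.Dict.mk f).get? "severity" with
    | none => simpa [pvSevs] using ih d
    | some s => simpa [pvSevs] using ih (d.modify s 0 (· + 1))

lemma pvLenSevs (findings : List (List (String × String)))
    (h : Pre_estimate_remediation_py findings) :
    (pvSevs findings).length = findings.length := by
  induction findings with
  | nil => rfl
  | cons f rest ih =>
    unfold Pre_estimate_remediation_py at h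
    simp only [List.all_cons, Bool.and_eq_true] at h
    have hc := h.1
    rw [PySem.Dict.contains_eq_isSome_get?] at hc
    simp only [pvSevs, List.filterMap_cons]
    cases hs : (PySem.Dict.mk f).get? "severity" with
    | none => rw [hs] at hc; simp at hc
    | some s =>
      simp only [List.length_cons]
      have := ih (by simpa [Pre_estimate_remediation_py] using h.2)
      simpa [pvSevs] using this

-- ===== VERDICT (by name: the statement is the Claim_ definition above) =====
theorem estimate_remediation_py_spec : Claim_equal_estimate_remediation_py := by
  intro findings _ hpre
  unfold Spec_estimate_remediation_py
  simp only [estimate_remediation_py, estimate_remediation_py_alt]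
  rw [pvFoldA, pvFoldB, PySem.Dict.getD_foldl_modify_add_one,
      PySem.Dict.getD_foldl_modify_add_one, pvLenSevs findings hpre]
  simp [PySem.Dict.empty, PySem.Dict.getD, PySem.Dict.get?]
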